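-- pv_equiv track=rewrite | github.com/Ayu727575/leetcodeSolutions | code_forces_easy_solution/UGU.py | ugu
-- ===== SOURCE A (Python) =====
-- def ugu(s):
--     ans=0
--     flag=False
--     for i in range(1,len(s)):
--         if s[i]!=s[i-1]:
--             if not flag and s[i]=="0":
--                 ans+=1
--                 flag=True
--             elif flag:
--                 ans+=1
--     return ans
-- ===== SOURCE B (Python) =====
-- def ugu(s):
--     runs = []
--     for c in s:
--         if not runs or runs[-1] != c:
--             runs.append(c)
--     try:
--         k = runs.index("0", 1)
--     except ValueError:
--         return 0
--     return len(runs) - k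
-- ===== Notes on version B (the rewrite author's own statement) =====
-- stated objective: idiomatic
-- what changed: Replaces A's per-character flag-and-counter loop over string indices by run-length-compressing the string into its run sequence and returning len(runs) - runs.index('0', 1) (0 if no such run), counting run boundaries from the first run that starts with '0'.
import Mathlib
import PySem

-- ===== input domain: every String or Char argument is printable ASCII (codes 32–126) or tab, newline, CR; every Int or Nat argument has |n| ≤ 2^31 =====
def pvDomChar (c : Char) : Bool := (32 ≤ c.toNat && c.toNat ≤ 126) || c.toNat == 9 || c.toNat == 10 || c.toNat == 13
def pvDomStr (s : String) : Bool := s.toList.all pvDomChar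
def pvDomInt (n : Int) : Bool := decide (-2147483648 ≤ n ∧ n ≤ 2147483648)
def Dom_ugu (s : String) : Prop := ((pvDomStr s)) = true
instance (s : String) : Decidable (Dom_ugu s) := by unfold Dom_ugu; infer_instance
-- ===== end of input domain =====

-- B replaces A's stateful flag loop by run-length compression plus an index search (idiomatic alternative, same O(n) cost).

-- ===== PORT A =====
-- Python's `for i in range(1, len(s))` with accesses s[i], s[i-1] (always in range)
-- is ported as a fold over the adjacent pairs (s[i-1], s[i]); exact on all inputs.
def uguStep (st : Int × Bool) (pc : Char × Char) : Int × Bool :=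
  if pc.2 ≠ pc.1 then
    if ¬ st.2 ∧ pc.2 = '0' then (st.1 + 1, true)
    else if st.2 then (st.1 + 1, st.2)
    else st
  else st

def ugu (s : String) : Int :=
  ((List.zip s.toList s.toList.tail).foldl uguStep (0, false)).1

-- ===== PORT B =====
-- runs.append(c) unless runs already ends with c (the `if not runs or runs[-1] != c` test)
def uguRunsStep (acc : List Char) (c : Char) : List Char :=
  if acc.getLast? = some c then acc else acc ++ [c]

-- runs.index("0", 1): scan positions 1.. ; none = the ValueError branch
def uguSearchZero : List Char → Nat → Option Nat
  | [], _ => none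
  | c :: rest, k => if c = '0' then some k else uguSearchZero rest (k + 1)

-- the `try: k = runs.index("0", 1) … return len(runs) - k / return 0` tail of B
def uguFind (runs : List Char) : Int :=
  match uguSearchZero (runs.drop 1) 1 with
  | some k => (runs.length : Int) - (k : Int)
  | none => 0

def ugu_alt (s : String) : Int :=
  uguFind (s.toList.foldl uguRunsStep [])

-- ===== PRECONDITION & SPEC =====
def Spec_ugu (s : String) (out : Int) : Prop := out = ugu_alt s
instance (s : String) (out : Int) : Decidable (Spec_ugu s out) := by unfold Spec_ugu; infer_instance

-- ===== CLAIM (what is proved, stated in full; the proofs are below) =====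
def Claim_equal_ugu : Prop := ∀ (s : String), Dom_ugu s → Spec_ugu s (ugu s)

-- ===== LEMMAS AND PROOFS =====

-- number of adjacent changes in p :: l
def uguTrans (p : Char) : List Char → Int
  | [] => 0
  | c :: l => (if c ≠ p then 1 else 0) + uguTrans c l

-- tail of the run sequence of p :: l
def uguRunsTail (p : Char) : List Char → List Char
  | [] => []
  | c :: l => if c ≠ p then c :: uguRunsTail c l else uguRunsTail p l

-- A's loop value with flag = false, ans = 0
def uguF (p : Char) : List Char → Int
  | [] => 0
  | c :: l => if c ≠ p then (if c = '0' then 1 + uguTrans c l else uguF c l) else uguF p l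

-- B's value on a run tail r: first '0' in r at 1-based position k ↦ 1 + |r| - k, else 0
def uguVal (r : List Char) : Int :=
  match uguSearchZero r 1 with
  | some k => 1 + (r.length : Int) - (k : Int)
  | none => 0

theorem uguTrans_len : ∀ (l : List Char) (p : Char),
    uguTrans p l = ((uguRunsTail p l).length : Int)
  | [], p => by simp [uguTrans, uguRunsTail]
  | c :: l, p => by
    by_cases h : c = p
    · subst h; simpa [uguTrans, uguRunsTail] using uguTrans_len l c
    · simp [uguTrans, uguRunsTail, h, uguTrans_len l c]
      ring

theorem uguFoldA_true : ∀ (l : List Char) (p : Char) (ans : Int),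
    List.foldl uguStep (ans, true) (List.zip (p :: l) l) = (ans + uguTrans p l, true)
  | [], p, ans => by simp [uguTrans]
  | c :: l, p, ans => by
    rw [List.zip_cons_cons, List.foldl_cons]
    by_cases h : c = p
    · subst h; simp [uguStep, uguTrans, uguFoldA_true l c ans]
    · simp [uguStep, h, uguTrans, uguFoldA_true l c (ans + 1)]
      ring

theorem uguFoldA_false : ∀ (l : List Char) (p : Char) (ans : Int),
    (List.foldl uguStep (ans, false) (List.zip (p :: l) l)).1 = ans + uguF p l
  | [], p, ans => by simp [uguF]
  | c :: l, p, ans => by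
    rw [List.zip_cons_cons, List.foldl_cons]
    by_cases h : c = p
    · subst h; simp [uguStep, uguF, uguFoldA_false l c ans]
    · by_cases h0 : c = '0'
      · subst h0
        simp [uguStep, h, uguF, uguFoldA_true l '0' (ans + 1)]
        ring
      · simp [uguStep, h, h0, uguF, uguFoldA_false l c ans]

theorem uguFoldRuns : ∀ (l acc : List Char) (p : Char),
    List.foldl uguRunsStep (acc ++ [p]) l = acc ++ [p] ++ uguRunsTail p l
  | [], acc, p => by simp [uguRunsTail]
  | c :: l, acc, p => by
    rw [List.foldl_cons]
    by_cases h : c = p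
    · subst h
      have hstep : uguRunsStep (acc ++ [c]) c = acc ++ [c] := by simp [uguRunsStep]
      rw [hstep, uguFoldRuns l acc c]
      simp [uguRunsTail]
    · have hstep : uguRunsStep (acc ++ [p]) c = (acc ++ [p]) ++ [c] := by
        simp [uguRunsStep]
        intro hc; exact absurd hc.symm h
      rw [hstep, uguFoldRuns l (acc ++ [p]) c]
      simp [uguRunsTail, h]

theorem uguSearchZero_shift : ∀ (l : List Char) (k : Nat),
    uguSearchZero l (k + 1) = (uguSearchZero l k).map (· + 1)
  | [], k => by simp [uguSearchZero]
  | c :: l, k => by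
    by_cases h : c = '0'
    · simp [uguSearchZero, h]
    · simp [uguSearchZero, h, uguSearchZero_shift l (k + 1)]

theorem uguF_eq_val : ∀ (l : List Char) (p : Char),
    uguF p l = uguVal (uguRunsTail p l)
  | [], p => by simp [uguF, uguRunsTail, uguVal, uguSearchZero]
  | c :: l, p => by
    by_cases h : c = p
    · subst h; simpa [uguF, uguRunsTail] using uguF_eq_val l c
    · by_cases h0 : c = '0'
      · subst h0
        simp [uguF, uguRunsTail, h, uguVal, uguSearchZero, uguTrans_len l '0']
        ring
      · have ihc := uguF_eq_val l c
        simp only [uguF, uguRunsTail, if_pos (show c ≠ p from h), if_neg h0]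
        rw [ihc]
        unfold uguVal
        simp only [uguSearchZero, if_neg h0, List.length_cons]
        rw [show uguSearchZero (uguRunsTail c l) 2 = (uguSearchZero (uguRunsTail c l) 1).map (· + 1) from uguSearchZero_shift _ 1]
        cases hz : uguSearchZero (uguRunsTail c l) 1 with
        | none => simp
        | some k =>
          simp only [Option.map_some]
          push_cast; ring

-- ===== VERDICT (by name: the statement is the Claim_ definition above) =====
theorem ugu_spec : Claim_equal_ugu := by
  unfold Claim_equal_ugu
  intro s _
  unfold Spec_ugu ugu ugu_alt
  cases hcs : s.toList with
  | nil => simp [uguFind, uguSearchZero]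
  | cons c0 rest =>
    have h1 : uguRunsStep [] c0 = [] ++ [c0] := by simp [uguRunsStep]
    rw [List.tail_cons, List.foldl_cons, h1, uguFoldRuns rest [] c0]
    rw [uguFoldA_false rest c0 0, uguF_eq_val rest c0]
    unfold uguVal uguFind
    simp only [List.nil_append, List.singleton_append, List.drop_succ_cons, List.drop_zero, List.length_cons]
    cases hz : uguSearchZero (uguRunsTail c0 rest) 1 with
    | none => rfl
    | some k => push_cast; ring
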